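-- pv_equiv track=rewrite | github.com/clemensv/real-time-sources | syke-hydro/syke_hydro/syke_hydro.py | _get_latest_per_station
-- ===== SOURCE A (Python) =====
-- def _get_latest_per_station(readings: list) -> dict:
--     """Group readings by Paikka_Id and keep only the latest per station."""
--     latest = {}
--     for r in readings:
--         pid = r.get('Paikka_Id')
--         if pid is None:
--             continue
--         existing = latest.get(pid)
--         if existing is None or r.get('Aika', '') > existing.get('Aika', ''):
--             latest[pid] = r
--     return latest
-- ===== SOURCE B (Python) =====
-- def _get_latest_per_station(readings: list) -> dict:
--     """Group readings by Paikka_Id into buckets, then reduce each bucket with max."""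
--     buckets = {}
--     for r in readings:
--         pid = r.get('Paikka_Id')
--         if pid is None:
--             continue
--         buckets.setdefault(pid, []).append(r)
--     return {pid: max(group, key=lambda g: g.get('Aika', ''))
--             for pid, group in buckets.items()}
-- ===== Notes on version B (the rewrite author's own statement) =====
-- stated objective: alternative
-- what changed: B materializes all readings per station in buckets in one pass and then reduces each bucket with max (first-maximal, matching A's strict-> first-wins rule), instead of maintaining a running latest reading inline.
import Mathlib
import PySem

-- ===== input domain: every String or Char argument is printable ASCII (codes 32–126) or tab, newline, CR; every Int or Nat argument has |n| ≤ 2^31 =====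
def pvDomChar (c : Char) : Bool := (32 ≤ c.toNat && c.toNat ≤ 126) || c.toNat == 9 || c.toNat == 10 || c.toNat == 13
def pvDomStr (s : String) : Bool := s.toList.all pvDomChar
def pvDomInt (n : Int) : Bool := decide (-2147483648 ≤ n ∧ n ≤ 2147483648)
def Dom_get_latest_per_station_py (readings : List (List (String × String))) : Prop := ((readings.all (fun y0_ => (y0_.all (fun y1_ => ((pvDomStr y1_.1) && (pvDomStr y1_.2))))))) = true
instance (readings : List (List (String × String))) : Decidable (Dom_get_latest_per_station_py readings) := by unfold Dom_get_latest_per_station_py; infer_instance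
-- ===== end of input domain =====

-- B groups the readings into per-station buckets in one pass and then reduces each
-- bucket with Python's first-maximal max, instead of A's running inline latest;
-- objective: alternative decomposition (same asymptotic cost).

-- r.get(k): a reading is a dict ported as an association list, lookup = first match
def pvGetKey (r : List (String × String)) (k : String) : Option String :=
  (r.find? (fun p => p.1 == k)).map (·.2)

-- r.get('Aika', '')
def pvAika (r : List (String × String)) : String :=
  (pvGetKey r "Aika").getD ""

-- Python's  r.get('Aika','') > existing.get('Aika','')  (strict string >)
def pvLater (existing r : List (String × String)) : Bool :=
  PySem.Chars.strLt (pvAika existing).toList (pvAika r).toList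

-- ===== PORT A =====
def stepA (latest : PySem.Dict String (List (String × String))) (r : List (String × String)) :
    PySem.Dict String (List (String × String)) :=
  match pvGetKey r "Paikka_Id" with
  | none => latest
  | some pid =>
    match latest.get? pid with
    | none => latest.insert pid r
    | some existing => if pvLater existing r then latest.insert pid r else latest

def get_latest_per_station_py (readings : List (List (String × String))) : List (String × List (String × String)) :=
  (readings.foldl stepA PySem.Dict.empty).items

-- ===== PORT B =====
-- buckets.setdefault(pid, []).append(r)  ==  buckets[pid] = buckets.get(pid, []) + [r]
def stepB (buckets : PySem.Dict String (List (List (String × String)))) (r : List (String × String)) :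
    PySem.Dict String (List (List (String × String))) :=
  match pvGetKey r "Paikka_Id" with
  | none => buckets
  | some pid => buckets.modify pid [] (· ++ [r])

-- max(group, key=lambda g: g.get('Aika','')) : first maximal element (groups are never empty)
def pyMaxAika (group : List (List (String × String))) : List (String × String) :=
  match group with
  | [] => []
  | x :: xs => xs.foldl (fun best g => if pvLater best g then g else best) x

def get_latest_per_station_py_alt (readings : List (List (String × String))) : List (String × List (String × String)) :=
  ((readings.foldl stepB PySem.Dict.empty).items).map (fun p => (p.1, pyMaxAika p.2))

-- ===== PRECONDITION & SPEC =====
def Spec_get_latest_per_station_py (readings : List (List (String × String))) (out : List (String × List (String × String))) : Prop := out = get_latest_per_station_py_alt readings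
instance (readings : List (List (String × String))) (out : List (String × List (String × String))) : Decidable (Spec_get_latest_per_station_py readings out) := by unfold Spec_get_latest_per_station_py; infer_instance

-- ===== CLAIM (what is proved, stated in full; the proofs are below) =====
def Claim_equal_get_latest_per_station_py : Prop := ∀ (readings : List (List (String × String))), Dom_get_latest_per_station_py readings → Spec_get_latest_per_station_py readings (get_latest_per_station_py readings)

-- ===== LEMMAS AND PROOFS =====

-- a dict whose items are a value-wise image of another dict's items has image lookups
theorem get?_of_items_map {ν ν' : Type} (d : PySem.Dict String ν) (e : PySem.Dict String ν')
    (f : ν → ν') (h : e.items = d.items.map (fun p => (p.1, f p.2))) (k : String) :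
    e.get? k = (d.get? k).map f := by
  cases hf : d.items.find? (fun p => p.1 == k) <;>
    simp [PySem.Dict.get?, h, List.find?_map, Function.comp_def, hf]
-- Python max over group + [r] = compare r against max of group (group nonempty)
theorem pyMaxAika_append (g : List (List (String × String))) (r : List (String × String)) (hg : g ≠ []) :
    pyMaxAika (g ++ [r]) = if pvLater (pyMaxAika g) r then r else pyMaxAika g := by
  match g, hg with
  | x :: xs, _ => simp [pyMaxAika, List.foldl_append]
-- the loop invariant: A's latest is the value-wise pyMaxAika image of B's buckets
theorem loop_inv (readings : List (List (String × String)))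
    (latest : PySem.Dict String (List (String × String)))
    (buckets : PySem.Dict String (List (List (String × String))))
    (hnd : buckets.keys.Nodup)
    (hne : ∀ p ∈ buckets.items, p.2 ≠ [])
    (hit : latest.items = buckets.items.map (fun p => (p.1, pyMaxAika p.2))) :
    (readings.foldl stepA latest).items
      = ((readings.foldl stepB buckets).items).map (fun p => (p.1, pyMaxAika p.2)) := by
  induction readings generalizing latest buckets with
  | nil => simpa using hit
  | cons r rest ih =>
    simp only [List.foldl_cons]
    cases hpid : pvGetKey r "Paikka_Id" with
    | none =>
      have ha : stepA latest r = latest := by simp [stepA, hpid]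
      have hb : stepB buckets r = buckets := by simp [stepB, hpid]
      rw [ha, hb]; exact ih _ _ hnd hne hit
    | some pid =>
      have hget := get?_of_items_map buckets latest pyMaxAika hit pid
      have hb : stepB buckets r = buckets.insert pid (buckets.getD pid [] ++ [r]) := by
        simp [stepB, hpid, PySem.Dict.modify]
      by_cases hc : buckets.contains pid = true
      · -- existing bucket
        obtain ⟨g, hbg⟩ : ∃ g, buckets.get? pid = some g := by
          rw [PySem.Dict.contains_eq_isSome_get?] at hc
          exact Option.isSome_iff_exists.mp hc
        have hlg : latest.get? pid = some (pyMaxAika g) := by rw [hget, hbg]; rfl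
        have hgne : g ≠ [] := hne (pid, g) (PySem.Dict.mem_items_of_get?_eq_some buckets hbg)
        have hval : ∀ p ∈ buckets.items, p.1 = pid → p.2 = g := by
          intro p hp hpk
          have := PySem.Dict.get?_of_mem_items buckets (k := p.1) (v := p.2) hp hnd
          rw [hpk, hbg] at this
          exact (Option.some.inj this).symm
        have hbitems : (stepB buckets r).items
            = buckets.items.map (fun p => if p.1 == pid then (pid, g ++ [r]) else p) := by
          rw [hb, PySem.Dict.items_insert_of_contains buckets _ hc,
              PySem.Dict.getD_of_get?_eq_some buckets [] hbg]
        have hlc : latest.contains pid = true := by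
          rw [PySem.Dict.contains_eq_isSome_get?, hlg]; rfl
        have hnd' : (stepB buckets r).keys.Nodup := by
          rw [hb, PySem.Dict.keys_insert_of_contains buckets _ hc]; exact hnd
        have hne' : ∀ p ∈ (stepB buckets r).items, p.2 ≠ [] := by
          rw [hbitems]
          intro p hp
          obtain ⟨q, hq, rfl⟩ := List.mem_map.mp hp
          by_cases h : q.1 == pid
          · simp [h]
          · simp only [h, Bool.false_eq_true, if_false]; exact hne q hq
        refine ih _ _ hnd' hne' ?_
        rw [hbitems, List.map_map]
        by_cases hL : pvLater (pyMaxAika g) r = true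
        · have ha : stepA latest r = latest.insert pid r := by
            simp [stepA, hpid, hlg, hL]
          rw [ha, PySem.Dict.items_insert_of_contains latest _ hlc, hit, List.map_map]
          refine List.map_congr_left ?_
          intro p hp
          by_cases h : p.1 = pid
          · simp [h, pyMaxAika_append g r hgne, hL]
          · simp [h]
        · have ha : stepA latest r = latest := by
            simp [stepA, hpid, hlg, hL]
          rw [ha, hit]
          refine List.map_congr_left ?_
          intro p hp
          by_cases h : p.1 = pid
          · simp [h, pyMaxAika_append g r hgne, hL, hval p hp h]
          · simp [h]
      · -- fresh key
        have hc' : buckets.contains pid = false := by simpa using hc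
        have hbn : buckets.get? pid = none := by
          have := PySem.Dict.contains_eq_isSome_get? buckets pid
          rw [hc'] at this
          exact Option.not_isSome_iff_eq_none.mp (by rw [← this]; simp)
        have hln : latest.get? pid = none := by rw [hget, hbn]; rfl
        have hlc : latest.contains pid = false := by
          have := PySem.Dict.contains_eq_isSome_get? latest pid
          rw [hln] at this; simpa using this
        have ha : stepA latest r = latest.insert pid r := by simp [stepA, hpid, hln]
        have hbitems : (stepB buckets r).items = buckets.items ++ [(pid, [r])] := by
          rw [hb, PySem.Dict.getD_of_not_contains buckets [] hc',
              PySem.Dict.items_insert_of_not_contains buckets _ (by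
                rw [PySem.Dict.contains_eq_isSome_get?] at hc' ⊢
                exact hc'), List.nil_append]
        have hnd' : (stepB buckets r).keys.Nodup := by
          rw [hb, PySem.Dict.keys_insert_of_not_contains buckets _ (by
                rw [PySem.Dict.contains_eq_isSome_get?] at hc' ⊢; exact hc')]
          have hpm : pid ∉ buckets.keys := fun hm =>
            by rw [(PySem.Dict.contains_iff_mem_keys buckets pid).mpr hm] at hc'; cases hc'
          have hdj : ∀ a ∈ buckets.keys, a ≠ pid := fun a ha2 heq => hpm (heq ▸ ha2)
          simp only [List.nodup_append, hnd, List.nodup_singleton, true_and]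
          intro a ha2 b hb2
          rw [List.mem_singleton] at hb2
          exact hb2 ▸ hdj a ha2
        have hne' : ∀ p ∈ (stepB buckets r).items, p.2 ≠ [] := by
          rw [hbitems]
          intro p hp
          rcases List.mem_append.mp hp with h | h
          · exact hne p h
          · simp at h; subst h; simp
        refine ih _ _ hnd' hne' ?_
        rw [ha, PySem.Dict.items_insert_of_not_contains latest _ hlc, hit, hbitems]
        simp [pyMaxAika]
-- ===== VERDICT (by name: the statement is the Claim_ definition above) =====
theorem get_latest_per_station_py_spec : Claim_equal_get_latest_per_station_py := by
  intro readings _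
  unfold Spec_get_latest_per_station_py get_latest_per_station_py get_latest_per_station_py_alt
  exact loop_inv readings _ _ (by simp [PySem.Dict.keys_empty]) (by simp [PySem.Dict.empty]) (by simp [PySem.Dict.empty])
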